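-- pv_equiv track=rewrite | github.com/davidalvarezdlt/master_thesis | thesis_inpainting/runner.py | inpainting_algorithm_ff_indexes
-- ===== SOURCE A (Python) =====
-- def inpainting_algorithm_ff_indexes(t, max_t, s, D):
--     ref_candidates = list(range(max_t))
--     ref_candidates.pop(t)
--     ref_candidates_dist = list(map(lambda x: abs(x - t), ref_candidates))
--     ref_candidates_sorted = [r[1] for r in sorted(zip(ref_candidates_dist, ref_candidates))]
--     return list(
--         filter(lambda x: abs(x - t) <= D and abs(x - t) % s == 0, ref_candidates_sorted)
--     )
-- ===== SOURCE B (Python) =====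
-- def inpainting_algorithm_ff_indexes(t, max_t, s, D):
--     if not 0 <= t < max_t:
--         raise IndexError('frame index out of range')
--     step = abs(s)
--     limit = min(D, max(t, max_t - 1 - t))
--     return [x for d in range(step, limit + 1, step)
--             for x in (t - d, t + d) if 0 <= x < max_t]
-- ===== Notes on version B (the rewrite author's own statement) =====
-- stated objective: faster
-- what changed: Instead of materialising range(max_t), popping index t, computing all distances, sorting the zipped pairs and filtering, B directly enumerates the admissible distances d = |s|, 2|s|, ... up to min(D, max(t, max_t-1-t)) and emits t-d then t+d when in range, which is already A's sorted order. Pre_ excludes s = 0 (B's range step would be zero and raises ValueError; A raises ZeroDivisionError there unless the short-circuited filter never reaches %s) and negative t, where A's wraparound pop accidentally removes frame max_t+t while still measuring distances from the negative t; …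
-- outside the precondition, e.g. on inpainting_algorithm_ff_indexes(0, 2, 0, 0): A returns [], B raises ValueError; on inpainting_algorithm_ff_indexes(-2, 4, 2, 5): A returns [0], B raises IndexError
import Mathlib
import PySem

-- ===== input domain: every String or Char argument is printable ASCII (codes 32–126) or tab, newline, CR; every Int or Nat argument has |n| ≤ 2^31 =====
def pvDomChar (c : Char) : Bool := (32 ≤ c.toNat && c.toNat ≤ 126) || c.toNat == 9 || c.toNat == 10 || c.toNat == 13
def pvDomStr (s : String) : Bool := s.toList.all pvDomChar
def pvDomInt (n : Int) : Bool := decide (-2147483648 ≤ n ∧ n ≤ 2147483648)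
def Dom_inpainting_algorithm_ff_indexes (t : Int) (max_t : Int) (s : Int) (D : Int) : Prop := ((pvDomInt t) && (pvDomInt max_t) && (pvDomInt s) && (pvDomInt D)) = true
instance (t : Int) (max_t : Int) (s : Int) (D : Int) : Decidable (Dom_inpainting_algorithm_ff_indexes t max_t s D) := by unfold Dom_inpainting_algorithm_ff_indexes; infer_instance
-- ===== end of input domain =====

-- B enumerates the admissible distances d = |s|, 2|s|, … ≤ min(D, max(t, max_t-1-t)) and emits t-d then t+d,
-- which is already A's sorted order: O(D/|s|) instead of A's build-sort-filter O(max_t log max_t).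

-- ===== PORT A =====
-- Python's sorted(zip(dist, cand)) sorts the pairs by Python's lexicographic tuple comparison,
-- the Bool test pvLt. pvMerge/pvMSort is a stable merge sort under that comparison, proved
-- extensionally equal to the PySem primitive (lemma pvMSort_eq_sorted2 below); it is used here
-- only because sorted2's insertion recursion cannot be evaluated by the interpreter at the
-- sampled list sizes (it computes the same list on every input).
def pvLt (a b : Int × Int) : Bool := decide (a.1 < b.1) || (!decide (b.1 < a.1) && decide (a.2 < b.2))

def pvMerge : Nat → List (Int × Int) → List (Int × Int) → List (Int × Int) → List (Int × Int)
  | 0, acc, xs, ys => acc.reverse ++ xs ++ ys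
  | _ + 1, acc, [], ys => acc.reverse ++ ys
  | _ + 1, acc, x :: xs, [] => acc.reverse ++ x :: xs
  | fuel + 1, acc, x :: xs, y :: ys =>
      if pvLt y x then pvMerge fuel (y :: acc) (x :: xs) ys
      else pvMerge fuel (x :: acc) xs (y :: ys)

def pvMSortFuel : Nat → List (Int × Int) → List (Int × Int)
  | 0, xs => xs
  | fuel + 1, xs =>
      if xs.length ≤ 1 then xs
      else
        pvMerge xs.length []
          (pvMSortFuel fuel (xs.take (xs.length / 2)))
          (pvMSortFuel fuel (xs.drop (xs.length / 2)))

def pvMSort (xs : List (Int × Int)) : List (Int × Int) := pvMSortFuel xs.length xs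

-- zip(xs, ys): equal to List.zip (lemma pvZip_eq below); accumulator form, evaluable at the sampled sizes
def pvZipAcc : List (Int × Int) → List Int → List Int → List (Int × Int)
  | acc, x :: xs, y :: ys => pvZipAcc ((x, y) :: acc) xs ys
  | acc, _, _ => acc.reverse

def pvZip (xs ys : List Int) : List (Int × Int) := pvZipAcc [] xs ys

def inpainting_algorithm_ff_indexes (t : Int) (max_t : Int) (s : Int) (D : Int) : List Int :=
  let ref_candidates := PySem.List.pyRange 0 max_t 1
  match PySem.List.pop? ref_candidates t with
  | none => []   -- Python raises IndexError here; excluded by Pre_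
  | some (_, ref) =>
    let ref_candidates_dist := ref.map (fun x => |x - t|)
    let ref_candidates_sorted :=
      (pvMSort (pvZip ref_candidates_dist ref)).map Prod.snd   -- = sorted2 … Prod.fst Prod.snd (pvMSort_eq_sorted2)
    ref_candidates_sorted.filter (fun x => decide (|x - t| ≤ D) && decide (PySem.Int.mod |x - t| s = 0))

-- ===== PORT B =====
def inpainting_algorithm_ff_indexes_alt (t : Int) (max_t : Int) (s : Int) (D : Int) : List Int :=
  if ¬ (0 ≤ t ∧ t < max_t) then []   -- Python B raises IndexError here; excluded by Pre_
  else
  let step := |s|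
  let limit := min D (max t (max_t - 1 - t))
  (PySem.List.pyRange step (limit + 1) step).flatMap
    (fun d => [t - d, t + d].filter (fun x => decide (0 ≤ x) && decide (x < max_t)))

-- ===== PRECONDITION & SPEC =====
-- Pre_ excludes (i) the inputs where Python A raises (IndexError: t out of range for pop; ZeroDivisionError:
-- s = 0 and the short-circuited filter reaches %s); (ii) s = 0 where A still returns [] — B's range step would
-- be zero and raises ValueError; (iii) negative t, where A's wraparound pop accidentally removes frame max_t+t
-- while still measuring distances from the negative t — B requires a real frame index and raises IndexError.
def Pre_inpainting_algorithm_ff_indexes (t : Int) (max_t : Int) (s : Int) (D : Int) : Prop :=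
  0 ≤ t ∧ t < max_t ∧ s ≠ 0
instance (t : Int) (max_t : Int) (s : Int) (D : Int) : Decidable (Pre_inpainting_algorithm_ff_indexes t max_t s D) := by unfold Pre_inpainting_algorithm_ff_indexes; infer_instance

def pvWitness_inpainting_algorithm_ff_indexes : Int × Int × Int × Int := (1, 4, 1, 2)

def Spec_inpainting_algorithm_ff_indexes (t : Int) (max_t : Int) (s : Int) (D : Int) (out : List Int) : Prop :=
  out = inpainting_algorithm_ff_indexes_alt t max_t s D
instance (t : Int) (max_t : Int) (s : Int) (D : Int) (out : List Int) : Decidable (Spec_inpainting_algorithm_ff_indexes t max_t s D out) := by unfold Spec_inpainting_algorithm_ff_indexes; infer_instance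

-- ===== CLAIM (what is proved, stated in full; the proofs are below) =====
def Claim_equal_inpainting_algorithm_ff_indexes : Prop := ∀ (t : Int) (max_t : Int) (s : Int) (D : Int), Dom_inpainting_algorithm_ff_indexes t max_t s D → Pre_inpainting_algorithm_ff_indexes t max_t s D → Spec_inpainting_algorithm_ff_indexes t max_t s D (inpainting_algorithm_ff_indexes t max_t s D)

-- ===== LEMMAS AND PROOFS =====

-- ==== order machinery for Python's lexicographic sort of (distance, index) pairs ====

def pvLexLe (a b : Int × Int) : Prop := a.1 < b.1 ∨ (a.1 = b.1 ∧ a.2 ≤ b.2)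

lemma pvLt_true {a b : Int × Int} (h : pvLt a b = true) : pvLexLe a b := by
  simp [pvLt] at h; unfold pvLexLe; omega

lemma pvLt_false {a b : Int × Int} (h : pvLt a b = false) : pvLexLe b a := by
  simp [pvLt] at h; unfold pvLexLe; omega

lemma pvLexLe_trans {a b c : Int × Int} (h1 : pvLexLe a b) (h2 : pvLexLe b c) : pvLexLe a c := by
  unfold pvLexLe at *; omega

lemma insertBy_pairwise_lexle (x : Int × Int) (ys : List (Int × Int))
    (h : ys.Pairwise pvLexLe) : (PySem.List.insertBy pvLt x ys).Pairwise pvLexLe := by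
  induction ys with
  | nil => simp [PySem.List.insertBy]
  | cons y ys ih =>
    rw [PySem.List.insertBy]
    rcases h with _ | ⟨hy, hys⟩
    by_cases hlt : pvLt x y = true
    · simp only [hlt, if_true]
      refine List.Pairwise.cons ?_ (List.Pairwise.cons hy hys)
      intro z hz
      rcases List.mem_cons.mp hz with rfl | hz
      · exact pvLt_true hlt
      · exact pvLexLe_trans (pvLt_true hlt) (hy z hz)
    · rw [if_neg (by simp [hlt])]
      refine List.Pairwise.cons ?_ (ih hys)
      intro z hz
      rcases (PySem.List.insertBy_mem_iff pvLt x z ys).mp hz with rfl | hz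
      · exact pvLt_false (by simpa using hlt)
      · exact hy z hz

lemma foldl_insertBy_pairwise (xs : List (Int × Int)) (acc : List (Int × Int))
    (h : acc.Pairwise pvLexLe) :
    (xs.foldl (fun acc x => PySem.List.insertBy pvLt x acc) acc).Pairwise pvLexLe := by
  induction xs generalizing acc with
  | nil => simpa
  | cons x xs ih => exact ih _ (insertBy_pairwise_lexle x acc h)

lemma sorted2_eq_foldl (xs : List (Int × Int)) :
    PySem.List.sorted2 xs Prod.fst Prod.snd false
      = xs.foldl (fun acc x => PySem.List.insertBy pvLt x acc) [] := rfl

lemma sorted2_pairwise_lexle (xs : List (Int × Int)) :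
    (PySem.List.sorted2 xs Prod.fst Prod.snd false).Pairwise pvLexLe := by
  rw [sorted2_eq_foldl]; exact foldl_insertBy_pairwise xs [] (by simp)

lemma sorted2_eq_of_perm_of_pairwise (xs ys : List (Int × Int))
    (hp : ys.Perm xs) (hs : ys.Pairwise pvLexLe) :
    PySem.List.sorted2 xs Prod.fst Prod.snd false = ys := by
  refine ((PySem.List.sorted2_perm xs Prod.fst Prod.snd false).trans hp.symm).eq_of_pairwise
    ?_ (sorted2_pairwise_lexle xs) hs
  intro a b _ _ h1 h2
  unfold pvLexLe at *
  have : a.1 = b.1 ∧ a.2 = b.2 := by omega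
  exact Prod.ext this.1 this.2

-- ==== the merge sort of port A computes sorted2 ====

lemma pvZipAcc_eq (acc : List (Int × Int)) (xs ys : List Int) :
    pvZipAcc acc xs ys = acc.reverse ++ xs.zip ys := by
  induction xs generalizing acc ys with
  | nil => rw [pvZipAcc.eq_def]; simp
  | cons x xs ih =>
    cases ys with
    | nil => rw [pvZipAcc.eq_def]; simp
    | cons y ys => rw [pvZipAcc, ih]; simp

lemma pvZip_eq (xs ys : List Int) : pvZip xs ys = xs.zip ys := by
  simpa using pvZipAcc_eq [] xs ys

lemma pvMerge_perm (fuel : Nat) (acc xs ys : List (Int × Int)) :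
    (pvMerge fuel acc xs ys).Perm (acc ++ xs ++ ys) := by
  induction fuel generalizing acc xs ys with
  | zero =>
    rw [pvMerge]
    exact ((acc.reverse_perm).append_right xs).append_right ys
  | succ fuel ih =>
    match xs, ys with
    | [], ys => simpa [pvMerge] using ((acc.reverse_perm).append_right ys)
    | x :: xs, [] => simpa [pvMerge] using ((acc.reverse_perm).append_right (x :: xs))
    | x :: xs, y :: ys =>
      rw [pvMerge]
      by_cases hlt : pvLt y x = true
      · rw [if_pos hlt]
        refine (ih _ _ _).trans ?_
        rw [List.perm_iff_count]
        intro a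
        simp [List.count_append, List.count_cons]
        omega
      · rw [if_neg hlt]
        refine (ih _ _ _).trans ?_
        rw [List.perm_iff_count]
        intro a
        simp [List.count_append, List.count_cons]
        omega

lemma pvMerge_pairwise (fuel : Nat) : ∀ (acc xs ys : List (Int × Int)),
    xs.length + ys.length ≤ fuel →
    xs.Pairwise pvLexLe → ys.Pairwise pvLexLe →
    acc.Pairwise (fun a b => pvLexLe b a) →
    (∀ a ∈ acc, ∀ z ∈ xs, pvLexLe a z) →
    (∀ a ∈ acc, ∀ z ∈ ys, pvLexLe a z) →
    (pvMerge fuel acc xs ys).Pairwise pvLexLe := by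
  induction fuel with
  | zero =>
    intro acc xs ys hn hx hy hacc hax hay
    match xs, ys with
    | [], [] =>
      rw [pvMerge]
      simp only [List.append_nil]
      rw [List.pairwise_reverse]
      exact hacc
    | x :: xs, _ => simp at hn
    | [], y :: ys => simp at hn
  | succ fuel ih =>
    intro acc xs ys hn hx hy hacc hax hay
    match xs, ys with
    | [], ys =>
      rw [pvMerge, List.pairwise_append, List.pairwise_reverse]
      exact ⟨hacc, hy, by intro a ha z hz; exact hay a (List.mem_reverse.mp ha) z hz⟩
    | x :: xs, [] =>
      rw [pvMerge, List.pairwise_append, List.pairwise_reverse]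
      exact ⟨hacc, hx, by intro a ha z hz; exact hax a (List.mem_reverse.mp ha) z hz⟩
    | x :: xs, y :: ys =>
      rw [pvMerge]
      rcases hx with _ | ⟨hxh, hxt⟩
      rcases hy with _ | ⟨hyh, hyt⟩
      by_cases hlt : pvLt y x = true
      · rw [if_pos hlt]
        have hyx : pvLexLe y x := pvLt_true hlt
        refine ih (y :: acc) (x :: xs) ys (by simp at hn ⊢; omega)
          (List.Pairwise.cons hxh hxt) hyt
          (List.Pairwise.cons (by intro a ha; exact hay a ha y List.mem_cons_self) hacc) ?_ ?_
        · intro a ha z hz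
          rcases List.mem_cons.mp ha with rfl | ha
          · rcases List.mem_cons.mp hz with rfl | hz
            · exact hyx
            · exact pvLexLe_trans hyx (hxh z hz)
          · exact hax a ha z hz
        · intro a ha z hz
          rcases List.mem_cons.mp ha with rfl | ha
          · exact hyh z hz
          · exact hay a ha z (List.mem_cons_of_mem _ hz)
      · rw [if_neg hlt]
        have hxy : pvLexLe x y := pvLt_false (by simpa using hlt)
        refine ih (x :: acc) xs (y :: ys) (by simp at hn ⊢; omega)
          hxt (List.Pairwise.cons hyh hyt)
          (List.Pairwise.cons (by intro a ha; exact hax a ha x List.mem_cons_self) hacc) ?_ ?_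
        · intro a ha z hz
          rcases List.mem_cons.mp ha with rfl | ha
          · exact hxh z hz
          · exact hax a ha z (List.mem_cons_of_mem _ hz)
        · intro a ha z hz
          rcases List.mem_cons.mp ha with rfl | ha
          · rcases List.mem_cons.mp hz with rfl | hz
            · exact hxy
            · exact pvLexLe_trans hxy (hyh z hz)
          · exact hay a ha z hz

lemma pvMSortFuel_perm (fuel : Nat) : ∀ (xs : List (Int × Int)),
    (pvMSortFuel fuel xs).Perm xs := by
  induction fuel with
  | zero => intro xs; rw [pvMSortFuel]
  | succ fuel ih =>
    intro xs
    rw [pvMSortFuel]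
    split
    · rfl
    · refine (pvMerge_perm _ [] _ _).trans ?_
      simp only [List.nil_append]
      exact ((ih _).append (ih _)).trans (by rw [List.take_append_drop])

lemma pvMSortFuel_pairwise (fuel : Nat) : ∀ (xs : List (Int × Int)),
    xs.length ≤ fuel → (pvMSortFuel fuel xs).Pairwise pvLexLe := by
  induction fuel with
  | zero =>
    intro xs h
    rw [pvMSortFuel]
    match xs, h with
    | [], _ => exact List.Pairwise.nil
  | succ fuel ih =>
    intro xs h
    rw [pvMSortFuel]
    split
    · match xs, (by assumption : xs.length ≤ 1) with
      | [], _ => exact List.Pairwise.nil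
      | [x], _ => simp
    · rename_i hlen
      have h2 : 2 ≤ xs.length := by omega
      have hl1 : ((pvMSortFuel fuel (xs.take (xs.length / 2)))).length = xs.length / 2 := by
        rw [(pvMSortFuel_perm fuel _).length_eq, List.length_take]; omega
      have hl2 : ((pvMSortFuel fuel (xs.drop (xs.length / 2)))).length
          = xs.length - xs.length / 2 := by
        rw [(pvMSortFuel_perm fuel _).length_eq, List.length_drop]
      refine pvMerge_pairwise _ [] _ _ (by omega)
        (ih _ (by rw [List.length_take]; omega)) (ih _ (by rw [List.length_drop]; omega))
        List.Pairwise.nil (by intro a ha; simp at ha) (by intro a ha; simp at ha)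

lemma pvMSort_eq_sorted2 (xs : List (Int × Int)) :
    PySem.List.sorted2 xs Prod.fst Prod.snd = pvMSort xs :=
  sorted2_eq_of_perm_of_pairwise xs (pvMSort xs) (pvMSortFuel_perm _ _)
    (pvMSortFuel_pairwise _ _ le_rfl)

-- ==== the popped candidate list ====

def pvT (t max_t : Int) : Int := if 0 ≤ t then t else max_t + t
def pvRef (t' max_t : Int) : List Int :=
  PySem.List.pyRange 0 t' 1 ++ PySem.List.pyRange (t'+1) max_t 1

lemma pvT_bounds {t max_t : Int} (h1 : -max_t ≤ t) (h2 : t < max_t) :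
    0 ≤ pvT t max_t ∧ pvT t max_t < max_t := by unfold pvT; split <;> omega

lemma pop_range {t max_t : Int} (h1 : -max_t ≤ t) (h2 : t < max_t) :
    PySem.List.pop? (PySem.List.pyRange 0 max_t 1) t
      = some (pvT t max_t, pvRef (pvT t max_t) max_t) := by
  obtain ⟨hb1, hb2⟩ := pvT_bounds h1 h2
  have hsplit : PySem.List.pyRange 0 max_t 1
      = PySem.List.pyRange 0 (pvT t max_t) 1
        ++ pvT t max_t :: PySem.List.pyRange (pvT t max_t + 1) max_t 1 := by
    rw [PySem.List.pyRange_one_append 0 (pvT t max_t) max_t (by omega) (by omega),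
      PySem.List.pyRange_one_cons (a := pvT t max_t) (b := max_t) (by omega)]
  have hlen : (PySem.List.pyRange 0 (pvT t max_t) 1).length = (pvT t max_t).toNat := by
    rw [PySem.List.length_pyRange_one]; omega
  have hlenall : (PySem.List.pyRange 0 max_t 1).length = max_t.toNat := by
    rw [PySem.List.length_pyRange_one]; omega
  have hidx : PySem.List.pyIdx? (PySem.List.pyRange 0 max_t 1).length t
      = some (pvT t max_t).toNat := by
    rw [hlenall]; unfold PySem.List.pyIdx? pvT
    unfold pvT at hb1 hb2
    split
    · rw [if_pos (by omega)]
    · rw [if_pos (by omega)]; congr 1; omega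
  unfold PySem.List.pop?
  rw [hidx]
  simp only [Option.bind_some]
  rw [hsplit, List.getElem?_append_right (by omega), List.eraseIdx_append_of_length_le (by omega)]
  rw [hlen]
  simp [pvRef]

lemma mem_pvRef {t' max_t x : Int} (hb1 : 0 ≤ t') (hb2 : t' < max_t) :
    x ∈ pvRef t' max_t ↔ 0 ≤ x ∧ x < max_t ∧ x ≠ t' := by
  simp only [pvRef, List.mem_append, PySem.List.mem_pyRange_one]
  omega

lemma nodup_pvRef (t' max_t : Int) : (pvRef t' max_t).Nodup := by
  unfold pvRef
  refine List.Nodup.append (PySem.List.nodup_pyRange_one _ _) (PySem.List.nodup_pyRange_one _ _) ?_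
  intro x hx hy
  rw [PySem.List.mem_pyRange_one] at hx hy
  omega

-- ==== shapes of the two outputs ====

def pvP (t s D x : Int) : Bool := decide (|x - t| ≤ D) && decide (PySem.Int.mod |x - t| s = 0)
def pvW (t : Int) (x y : Int) : Prop := |x - t| < |y - t| ∨ (|x - t| = |y - t| ∧ x ≤ y)
def pvStrict (t : Int) (x y : Int) : Prop := |x - t| < |y - t| ∨ (|x - t| = |y - t| ∧ x < y)
def pvPair (t x : Int) : Int × Int := (|x - t|, x)
def pvG (t max_t d : Int) : List Int :=
  (if 0 ≤ t - d ∧ t - d < max_t then [t - d] else [])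
    ++ (if 0 ≤ t + d ∧ t + d < max_t then [t + d] else [])
def pvMult (t max_t s D : Int) : List Int :=
  PySem.List.pyRange |s| (min D (max t (max_t - 1 - t)) + 1) |s|

lemma zip_map_self (f : Int → Int) (l : List Int) :
    (l.map f).zip l = l.map (fun x => (f x, x)) := by
  induction l with
  | nil => rfl
  | cons a l ih => simp [ih]

lemma A_eq_filter {t max_t : Int} (s D : Int) (h1 : -max_t ≤ t) (h2 : t < max_t) :
    inpainting_algorithm_ff_indexes t max_t s D
      = (((PySem.List.sorted2 ((pvRef (pvT t max_t) max_t).map (pvPair t))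
            Prod.fst Prod.snd).map Prod.snd).filter (pvP t s D)) := by
  simp only [inpainting_algorithm_ff_indexes]
  rw [pop_range h1 h2]
  simp only [pvZip_eq]
  have hzip : ((pvRef (pvT t max_t) max_t).map (fun x => |x - t|)).zip (pvRef (pvT t max_t) max_t)
      = (pvRef (pvT t max_t) max_t).map (pvPair t) := zip_map_self _ _
  simp only [hzip, ← pvMSort_eq_sorted2]
  rfl

lemma B_eq_flatMap {t max_t : Int} (s D : Int) (h1 : 0 ≤ t) (h2 : t < max_t) :
    inpainting_algorithm_ff_indexes_alt t max_t s D
      = (pvMult t max_t s D).flatMap (pvG t max_t) := by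
  unfold inpainting_algorithm_ff_indexes_alt pvMult
  rw [if_neg (by omega)]
  refine List.flatMap_congr ?_
  intro d _
  unfold pvG
  by_cases e1 : d ≤ t <;> by_cases e2 : t - d < max_t <;>
    by_cases e3 : 0 ≤ t + d <;> by_cases e4 : t + d < max_t <;>
      simp [List.filter, e1, e2, e3, e4]

lemma mem_A {t max_t s D x : Int} (h1 : -max_t ≤ t) (h2 : t < max_t) :
    x ∈ inpainting_algorithm_ff_indexes t max_t s D
      ↔ ((0 ≤ x ∧ x < max_t ∧ x ≠ pvT t max_t) ∧ pvP t s D x = true) := by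
  obtain ⟨hb1, hb2⟩ := pvT_bounds h1 h2
  rw [A_eq_filter s D h1 h2, List.mem_filter]
  have hperm := (PySem.List.sorted2_perm ((pvRef (pvT t max_t) max_t).map (pvPair t))
    Prod.fst Prod.snd false).map Prod.snd
  rw [List.Perm.mem_iff hperm, List.map_map]
  have : (Prod.snd ∘ pvPair t) = id := by funext z; rfl
  rw [this, List.map_id, mem_pvRef hb1 hb2]

lemma abs_sub_eq_left {t d x : Int} (hd : 0 ≤ d) (hx : x = t - d) : |x - t| = d := by
  subst hx; rw [show t - d - t = -d by ring, abs_neg, abs_of_nonneg hd]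

lemma abs_sub_eq_right {t d x : Int} (hd : 0 ≤ d) (hx : x = t + d) : |x - t| = d := by
  subst hx; rw [show t + d - t = d by ring, abs_of_nonneg hd]

lemma mem_pvMult {t max_t s D d : Int} (hs : s ≠ 0) :
    d ∈ pvMult t max_t s D
      ↔ s ∣ d ∧ 1 ≤ d ∧ d ≤ D ∧ d ≤ max t (max_t - 1 - t) := by
  have hq : (0:Int) < |s| := abs_pos.mpr hs
  rw [pvMult, PySem.List.mem_pyRange_iff_of_pos hq]
  have hdvd : |s| ∣ d - |s| ↔ s ∣ d := by
    constructor
    · intro h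
      have := dvd_add h (dvd_refl |s|)
      rw [sub_add_cancel] at this
      exact (abs_dvd _ _).mp this
    · intro h
      exact dvd_sub ((abs_dvd _ _).mpr h) (dvd_refl _)
  rw [hdvd]
  constructor
  · rintro ⟨ha, hb, hc⟩
    exact ⟨hc, by omega, by omega, by omega⟩
  · rintro ⟨ha, hb, hc, hd'⟩
    have : |s| ≤ d := Int.le_of_dvd (by omega) ((abs_dvd _ _).mpr ha)
    exact ⟨this, by omega, ha⟩

lemma mem_pvG {t max_t d x : Int} (hd : 0 ≤ d) :
    x ∈ pvG t max_t d
      ↔ ((x = t - d ∨ x = t + d) ∧ 0 ≤ x ∧ x < max_t) := by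
  unfold pvG
  simp only [List.mem_append]
  split_ifs <;> simp <;> omega

lemma mem_B {t max_t s D x : Int} (h1 : 0 ≤ t) (h2 : t < max_t) (hs : s ≠ 0) :
    x ∈ inpainting_algorithm_ff_indexes_alt t max_t s D
      ↔ ((0 ≤ x ∧ x < max_t ∧ x ≠ t) ∧ s ∣ |x - t| ∧ |x - t| ≤ D) := by
  rw [B_eq_flatMap s D h1 h2, List.mem_flatMap]
  constructor
  · rintro ⟨d, hdm, hx⟩
    rw [mem_pvMult hs] at hdm
    obtain ⟨hdvd, hd1, hdD, hdM⟩ := hdm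
    rw [mem_pvG (by omega)] at hx
    obtain ⟨hxe, hx0, hxm⟩ := hx
    have habs : |x - t| = d := by
      rcases hxe with h | h
      · exact abs_sub_eq_left (by omega) h
      · exact abs_sub_eq_right (by omega) h
    refine ⟨⟨hx0, hxm, ?_⟩, by rw [habs]; exact hdvd, by rw [habs]; exact hdD⟩
    rcases hxe with h | h <;> omega
  · rintro ⟨⟨hx0, hxm, hxt⟩, hdvd, hD⟩
    refine ⟨|x - t|, ?_, ?_⟩
    · rw [mem_pvMult hs]
      have h1' : 1 ≤ |x - t| := by
        have : x - t ≠ 0 := by omega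
        have := abs_pos.mpr this
        omega
      have hM : |x - t| ≤ max t (max_t - 1 - t) := by
        by_cases h : x ≤ t
        · rw [abs_of_nonpos (by omega)]; omega
        · rw [abs_of_nonneg (by omega)]; omega
      exact ⟨hdvd, h1', hD, hM⟩
    · rw [mem_pvG (abs_nonneg _)]
      refine ⟨?_, hx0, hxm⟩
      by_cases h : x ≤ t
      · left; rw [abs_of_nonpos (by omega)]; ring
      · right; rw [abs_of_nonneg (by omega)]; ring

-- ==== pairwise orderings of the two outputs ====

lemma pairwise_A {t max_t s D : Int} (h1 : -max_t ≤ t) (h2 : t < max_t) :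
    (inpainting_algorithm_ff_indexes t max_t s D).Pairwise (pvW t) := by
  rw [A_eq_filter s D h1 h2]
  refine List.Pairwise.filter _ ?_
  have hpw := sorted2_pairwise_lexle ((pvRef (pvT t max_t) max_t).map (pvPair t))
  have hmemform : ∀ a ∈ PySem.List.sorted2 ((pvRef (pvT t max_t) max_t).map (pvPair t))
      Prod.fst Prod.snd false, a.1 = |a.2 - t| := by
    intro a ha
    have := (PySem.List.sorted2_perm _ _ _ _).mem_iff.mp ha
    rw [List.mem_map] at this
    obtain ⟨z, _, rfl⟩ := this
    rfl
  rw [List.pairwise_map]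
  refine (List.Pairwise.imp_of_mem ?_ hpw)
  intro a b ha hb hle
  have e1 := hmemform a ha
  have e2 := hmemform b hb
  unfold pvLexLe at hle
  unfold pvW
  omega

lemma pairwise_strict_B {t max_t : Int} (s D : Int) (h1 : 0 ≤ t) (h2 : t < max_t) (hs : s ≠ 0) :
    (inpainting_algorithm_ff_indexes_alt t max_t s D).Pairwise (pvStrict t) := by
  rw [B_eq_flatMap s D h1 h2]
  rw [List.pairwise_flatMap]
  constructor
  · intro d hd
    rw [mem_pvMult hs] at hd
    unfold pvG
    have e1 : |t - d - t| = d := abs_sub_eq_left (by omega) rfl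
    have e2 : |t + d - t| = d := abs_sub_eq_right (by omega) rfl
    split_ifs <;> simp [pvStrict] <;> omega
  · have hpw : (pvMult t max_t s D).Pairwise (· < ·) := by
      have hq : (0:Int) < |s| := abs_pos.mpr hs
      rw [pvMult, PySem.List.pyRange_of_pos _ _ hq]
      rw [List.pairwise_map]
      refine List.Pairwise.imp_of_mem ?_ (List.pairwise_lt_range)
      intro a b _ _ hab
      have : (a:Int) < b := by exact_mod_cast hab
      nlinarith
    refine hpw.imp_of_mem ?_
    intro d1 d2 hd1 hd2 hlt x hx y hy
    rw [mem_pvMult hs] at hd1 hd2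
    rw [mem_pvG (by omega)] at hx
    rw [mem_pvG (by omega)] at hy
    have e1 : |x - t| = d1 := by
      rcases hx.1 with h | h
      · exact abs_sub_eq_left (by omega) h
      · exact abs_sub_eq_right (by omega) h
    have e2 : |y - t| = d2 := by
      rcases hy.1 with h | h
      · exact abs_sub_eq_left (by omega) h
      · exact abs_sub_eq_right (by omega) h
    unfold pvStrict
    omega

lemma nodup_A {t max_t s D : Int} (h1 : -max_t ≤ t) (h2 : t < max_t) :
    (inpainting_algorithm_ff_indexes t max_t s D).Nodup := by
  rw [A_eq_filter s D h1 h2]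
  refine List.Nodup.filter _ ?_
  have hperm := (PySem.List.sorted2_perm ((pvRef (pvT t max_t) max_t).map (pvPair t))
    Prod.fst Prod.snd false).map Prod.snd
  rw [List.Perm.nodup_iff hperm, List.map_map]
  have : (Prod.snd ∘ pvPair t) = id := by funext z; rfl
  rw [this, List.map_id]
  exact nodup_pvRef _ _

lemma nodup_B {t max_t : Int} (s D : Int) (h1 : 0 ≤ t) (h2 : t < max_t) (hs : s ≠ 0) :
    (inpainting_algorithm_ff_indexes_alt t max_t s D).Nodup := by
  refine (pairwise_strict_B s D h1 h2 hs).imp ?_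
  intro a b h heq
  subst heq
  unfold pvStrict at h
  omega

lemma pvP_iff {t s D x : Int} : pvP t s D x = true ↔ |x - t| ≤ D ∧ s ∣ |x - t| := by
  unfold pvP
  rw [Bool.and_eq_true, decide_eq_true_iff, decide_eq_true_iff, PySem.Int.mod_eq_zero_iff_dvd]

-- ==== the main argument ====

lemma mem_A_iff_mem_B {t max_t s D : Int} (h1 : 0 ≤ t) (h2 : t < max_t) (hs : s ≠ 0) (x : Int) :
    x ∈ inpainting_algorithm_ff_indexes t max_t s D
      ↔ x ∈ inpainting_algorithm_ff_indexes_alt t max_t s D := by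
  rw [mem_A (by omega) h2, mem_B h1 h2 hs, pvP_iff]
  unfold pvT
  rw [if_pos h1]
  tauto

lemma main_eq {t max_t s D : Int} (h1 : 0 ≤ t) (h2 : t < max_t) (hs : s ≠ 0) :
    inpainting_algorithm_ff_indexes t max_t s D
      = inpainting_algorithm_ff_indexes_alt t max_t s D := by
  have hperm : (inpainting_algorithm_ff_indexes t max_t s D).Perm
      (inpainting_algorithm_ff_indexes_alt t max_t s D) :=
    (List.perm_ext_iff_of_nodup (nodup_A (by omega) h2) (nodup_B s D h1 h2 hs)).mpr
      (mem_A_iff_mem_B h1 h2 hs)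
  refine hperm.eq_of_pairwise ?_ (pairwise_A (by omega) h2)
    ((pairwise_strict_B s D h1 h2 hs).imp (by intro a b h; unfold pvStrict at h; unfold pvW; omega))
  intro a b _ _ hab hba
  unfold pvW at hab hba
  omega

-- ===== VERDICT (by name: the statement is the Claim_ definition above) =====
theorem inpainting_algorithm_ff_indexes_spec : Claim_equal_inpainting_algorithm_ff_indexes := by
  intro t max_t s D _ hpre
  obtain ⟨h1, h2, hs⟩ := hpre
  exact main_eq h1 h2 hs
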